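-- pv_equiv track=rewrite | github.com/travisgk/jplookup | jplookup/anki/_simplify.py | search_for_pronunciation
-- ===== SOURCE A (Python) =====
-- _TAG_PRIORITIES = [
--     (
--         "ipa",
--         "pitch-accent",
--         "kana",
--     ),
--     (
--         "pitch-accent",
--         "kana",
--     ),
--     (
--         "ipa",
--         "kana",
--     ),
--     ("kana",),
-- ]
--
-- def search_for_pronunciation(pronunciations: list, tag_priority_i: int = 0):
--     """
--     Returns the first pronunciation dictionary with all the tags
--     specified in <_TAG_PRIORITIES[tag_priority_i]>.
--
--     If no pronunciation was found, and there's a further tuple to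
--     check again in <_TAG_PRIORITIES>, then this function
--     runs recursively for that next tuple.
--     """
--     keys = _TAG_PRIORITIES[tag_priority_i]
--     for p in pronunciations:
--         if all(p.get(k) is not None for k in keys):
--             return p
--
--     if tag_priority_i < len(_TAG_PRIORITIES) - 1:
--         return search_for_pronunciation(pronunciations, tag_priority_i + 1)
--
--     return None
-- ===== SOURCE B (Python) =====
-- _TAG_PRIORITIES = [
--     (
--         "ipa",
--         "pitch-accent",
--         "kana",
--     ),
--     (
--         "pitch-accent",
--         "kana",
--     ),
--     (
--         "ipa",
--         "kana",
--     ),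
--     ("kana",),
-- ]
--
-- def search_for_pronunciation(pronunciations: list, tag_priority_i: int = 0):
--     """Single loop over the priority indices instead of tail recursion."""
--     for i in range(tag_priority_i, len(_TAG_PRIORITIES)):
--         keys = _TAG_PRIORITIES[i]
--         for p in pronunciations:
--             if all(p.get(k) is not None for k in keys):
--                 return p
--     return None
-- ===== Notes on version B (the rewrite author's own statement) =====
-- stated objective: simpler
-- what changed: The tail recursion that re-enters the function with tag_priority_i+1 is replaced by a single for-loop over range(tag_priority_i, len(_TAG_PRIORITIES)), indexing _TAG_PRIORITIES each iteration; the recursive call and the trailing boundary test disappear.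
import Mathlib
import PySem

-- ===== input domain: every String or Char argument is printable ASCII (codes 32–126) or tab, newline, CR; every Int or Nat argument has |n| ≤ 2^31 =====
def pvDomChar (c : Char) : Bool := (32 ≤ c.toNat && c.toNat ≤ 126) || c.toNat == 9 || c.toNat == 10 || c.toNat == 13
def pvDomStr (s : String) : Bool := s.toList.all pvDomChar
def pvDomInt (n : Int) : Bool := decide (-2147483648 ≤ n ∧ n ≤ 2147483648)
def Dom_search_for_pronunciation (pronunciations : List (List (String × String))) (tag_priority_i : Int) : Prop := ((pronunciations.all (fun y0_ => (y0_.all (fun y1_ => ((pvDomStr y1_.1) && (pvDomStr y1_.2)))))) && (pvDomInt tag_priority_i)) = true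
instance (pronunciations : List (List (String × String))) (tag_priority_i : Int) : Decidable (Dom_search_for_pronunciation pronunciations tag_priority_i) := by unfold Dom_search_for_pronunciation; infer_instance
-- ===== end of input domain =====

-- B replaces A's tail recursion over tag_priority_i by one for-loop over range(tag_priority_i, len(_TAG_PRIORITIES)) (simpler decomposition, same cost).

-- ===== PORT A =====
-- module constant _TAG_PRIORITIES
def pvTagPriorities : List (List String) :=
  [["ipa", "pitch-accent", "kana"], ["pitch-accent", "kana"], ["ipa", "kana"], ["kana"]]

-- 'all(p.get(k) is not None for k in keys)'; p.get = first match in the association list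
def pvHasAllKeys (p : List (String × String)) (keys : List String) : Bool :=
  keys.all (fun k => (p.find? (fun kv => kv.1 == k)).isSome)

def search_for_pronunciation (pronunciations : List (List (String × String))) (tag_priority_i : Int) : Option (List (String × String)) :=
  -- keys = _TAG_PRIORITIES[tag_priority_i]  (none = IndexError, excluded by Pre_)
  match PySem.List.pyGet? pvTagPriorities tag_priority_i with
  | none => none
  | some keys =>
    -- for p in pronunciations: if all(...): return p
    match pronunciations.find? (fun p => pvHasAllKeys p keys) with
    | some p => some p
    | none =>
      -- if tag_priority_i < len(_TAG_PRIORITIES) - 1: recurse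
      if tag_priority_i < (pvTagPriorities.length : Int) - 1 then
        search_for_pronunciation pronunciations (tag_priority_i + 1)
      else none
termination_by (((pvTagPriorities.length : Int) - 1) - tag_priority_i).toNat
decreasing_by simp only [pvTagPriorities] at *; omega

-- ===== PORT B =====
-- 'all(p.get(k) is not None for k in keys)' in B, via List.lookup (first match)
def pvHasAllKeysB (p : List (String × String)) (keys : List String) : Bool :=
  keys.all (fun k => (List.lookup k p).isSome)

def search_for_pronunciation_alt (pronunciations : List (List (String × String))) (tag_priority_i : Int) : Option (List (String × String)) :=
  -- for i in range(tag_priority_i, len(_TAG_PRIORITIES)): keys = _TAG_PRIORITIES[i]; inner scan with early return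
  (PySem.List.pyRange tag_priority_i (pvTagPriorities.length : Int) 1).findSome?
    (fun i =>
      match PySem.List.pyGet? pvTagPriorities i with
      | none => none   -- IndexError in B's Python (only for i ≤ -5, outside Pre_)
      | some keys => pronunciations.find? (fun p => pvHasAllKeysB p keys))

-- ===== PRECONDITION & SPEC =====
-- Pre_ excludes exactly the indices where A's initial _TAG_PRIORITIES[tag_priority_i] raises IndexError.
def Pre_search_for_pronunciation (pronunciations : List (List (String × String))) (tag_priority_i : Int) : Prop :=
  -4 ≤ tag_priority_i ∧ tag_priority_i ≤ 3

instance (pronunciations : List (List (String × String))) (tag_priority_i : Int) : Decidable (Pre_search_for_pronunciation pronunciations tag_priority_i) := by unfold Pre_search_for_pronunciation; infer_instance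

def pvWitness_search_for_pronunciation : (List (List (String × String))) × Int :=
  ([[("kana", "ka")], [("ipa", "ka"), ("pitch-accent", "0"), ("kana", "ka")]], 0)

def Spec_search_for_pronunciation (pronunciations : List (List (String × String))) (tag_priority_i : Int) (out : Option (List (String × String))) : Prop := out = search_for_pronunciation_alt pronunciations tag_priority_i
instance (pronunciations : List (List (String × String))) (tag_priority_i : Int) (out : Option (List (String × String))) : Decidable (Spec_search_for_pronunciation pronunciations tag_priority_i out) := by unfold Spec_search_for_pronunciation; infer_instance

-- ===== CLAIM (what is proved, stated in full; the proofs are below) =====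
def Claim_equal_search_for_pronunciation : Prop := ∀ (pronunciations : List (List (String × String))) (tag_priority_i : Int), Dom_search_for_pronunciation pronunciations tag_priority_i → Pre_search_for_pronunciation pronunciations tag_priority_i → Spec_search_for_pronunciation pronunciations tag_priority_i (search_for_pronunciation pronunciations tag_priority_i)


-- ===== LEMMAS AND PROOFS =====

-- A's and B's key-membership tests agree (find? on the pair vs lookup of the key).
theorem pvFind_isSome_eq_lookup (p : List (String × String)) (k : String) :
    (p.find? (fun kv => kv.1 == k)).isSome = (List.lookup k p).isSome := by
  induction p with
  | nil => rfl
  | cons hd tl ih =>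
    obtain ⟨a, b⟩ := hd
    by_cases h : a = k
    · subst h; simp [List.find?, List.lookup]
    · have h1 : (a == k) = false := by simp [h]
      have h2 : (k == a) = false := by simp [Ne.symm h]
      simpa [List.find?, List.lookup, h1, h2] using ih

-- A's and B's key-membership tests agree (find? on the pair vs lookup of the key).
theorem pvHasAllKeys_eq (p : List (String × String)) (keys : List String) :
    pvHasAllKeys p keys = pvHasAllKeysB p keys := by
  unfold pvHasAllKeys pvHasAllKeysB
  simp only [pvFind_isSome_eq_lookup]

theorem main_eq (pronunciations : List (List (String × String))) :
    ∀ (n : Nat) (i : Int), (3 - i).toNat ≤ n → -4 ≤ i → i ≤ 3 →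
      search_for_pronunciation pronunciations i = search_for_pronunciation_alt pronunciations i := by
  intro n
  induction n with
  | zero =>
    intro i hn h1 h2
    have hi3 : i = 3 := by omega
    subst hi3
    rw [search_for_pronunciation]
    unfold search_for_pronunciation_alt
    rw [show ((pvTagPriorities.length : Int)) = 4 from by simp [pvTagPriorities]]
    rw [PySem.List.pyRange_one_cons (by omega), PySem.List.pyRange_one_eq_nil (by omega)]
    simp only [List.findSome?_cons, List.findSome?_nil]
    have hg : PySem.List.pyGet? pvTagPriorities 3 = some ["kana"] := by decide
    rw [hg]
    simp only [pvHasAllKeys_eq]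
    cases pronunciations.find? (fun p => pvHasAllKeysB p ["kana"]) with
    | none => simp
    | some p => rfl
  | succ m ih =>
    intro i hn h1 h2
    rw [search_for_pronunciation]
    unfold search_for_pronunciation_alt
    rw [show ((pvTagPriorities.length : Int)) = 4 from by simp [pvTagPriorities]]
    rw [PySem.List.pyRange_one_cons (by omega : i < 4)]
    simp only [List.findSome?_cons]
    obtain ⟨keys, hg⟩ : ∃ keys, PySem.List.pyGet? pvTagPriorities i = some keys := by
      cases hE : PySem.List.pyGet? pvTagPriorities i with
      | none =>
        exfalso
        have := (PySem.List.pyGet?_eq_none_iff (xs := pvTagPriorities) (i := i)).mp hE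
        exact this (by simp [PySem.Raise.InRange, pvTagPriorities]; omega)
      | some k => exact ⟨k, rfl⟩
    rw [hg]
    simp only [pvHasAllKeys_eq]
    cases hf : pronunciations.find? (fun p => pvHasAllKeysB p keys) with
    | some p => rfl
    | none =>
      simp only []
      by_cases hlt : i < (4 : Int) - 1
      · rw [if_pos hlt]
        rw [ih (i + 1) (by omega) (by omega) (by omega)]
        unfold search_for_pronunciation_alt
        rw [show ((pvTagPriorities.length : Int)) = 4 from by simp [pvTagPriorities]]
      · rw [if_neg hlt]
        have hi3 : i = 3 := by omega
        subst hi3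
        rw [PySem.List.pyRange_one_eq_nil (by omega)]
        rfl

-- ===== VERDICT (by name: the statement is the Claim_ definition above) =====
theorem search_for_pronunciation_spec : Claim_equal_search_for_pronunciation := by
  intro prons i _ hpre
  unfold Spec_search_for_pronunciation
  exact main_eq prons (3 - i).toNat i le_rfl hpre.1 hpre.2
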